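-- pv_equiv track=rewrite | github.com/jiangtianh/LeetCode | 0163-missing-ranges/0163-missing-ranges.py | findMissingRanges
-- ===== SOURCE A (Python) =====
-- from typing import List
--
-- def findMissingRanges(nums: List[int], lower: int, upper: int) -> List[List[int]]:
--     l = lower
--     res = []
--     for n in nums:
--         r = n - 1
--         if r >= l:
--             res.append([l, r])
--
--         l = n+1
--
--     if upper >= l:
--         res.append([l, upper])
--
--     return res
-- ===== SOURCE B (Python) =====
-- def findMissingRanges(nums, lower, upper):
--     # Divide and conquer: pick the middle element as a pivot; missing ranges of
--     # the whole interval = missing ranges left of the pivot ++ those right of it.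
--     def gaps(seg, lo, hi):
--         if not seg:
--             return [[lo, hi]] if hi >= lo else []
--         m = len(seg) // 2
--         n = seg[m]
--         return gaps(seg[:m], lo, n - 1) + gaps(seg[m + 1:], n + 1, hi)
--     return gaps(nums, lower, upper)
-- ===== Notes on version B (the rewrite author's own statement) =====
-- stated objective: alternative
-- what changed: Replaces A's single left-to-right pass with a running lower-bound accumulator and post-loop tail check by a divide-and-conquer recursion: the middle element is a pivot and the result is the concatenation of the missing ranges computed independently on the left and right halves.
import Mathlib
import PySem

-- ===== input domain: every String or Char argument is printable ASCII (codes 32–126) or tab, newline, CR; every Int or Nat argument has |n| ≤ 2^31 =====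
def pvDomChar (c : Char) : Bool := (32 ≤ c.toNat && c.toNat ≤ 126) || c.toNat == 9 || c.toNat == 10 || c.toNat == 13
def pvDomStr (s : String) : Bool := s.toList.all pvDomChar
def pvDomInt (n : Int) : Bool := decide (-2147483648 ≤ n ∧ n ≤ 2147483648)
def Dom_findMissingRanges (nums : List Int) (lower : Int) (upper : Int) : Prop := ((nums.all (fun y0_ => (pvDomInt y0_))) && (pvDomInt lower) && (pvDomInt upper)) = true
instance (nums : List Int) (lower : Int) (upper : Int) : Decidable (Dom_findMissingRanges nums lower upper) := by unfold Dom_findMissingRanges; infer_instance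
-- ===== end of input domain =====

-- B replaces A's single accumulator pass by a divide-and-conquer recursion on a
-- middle pivot (alternative decomposition, same results).


-- ===== PORT A =====
-- literal port: the for-loop is a fold over state (l, res); then the tail check
def findMissingRanges (nums : List Int) (lower : Int) (upper : Int) : List (List Int) :=
  let st := nums.foldl (fun (st : Int × List (List Int)) n =>
    let l := st.1
    let r := n - 1
    let res := if r ≥ l then st.2 ++ [[l, r]] else st.2
    (n + 1, res)) (lower, [])
  if upper ≥ st.1 then st.2 ++ [[st.1, upper]] else st.2

-- ===== PORT B =====
-- literal port of Source B's helper `gaps`; seg[m] with m = len(seg)/2 is always in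
-- range on a nonempty seg, so getD is exact here
def fmrGaps : List Int → Int → Int → List (List Int)
  | [], lo, hi => if hi ≥ lo then [[lo, hi]] else []
  | a :: t, lo, hi =>
    let seg := a :: t
    let m := seg.length / 2
    let n := seg.getD m 0
    fmrGaps (seg.take m) lo (n - 1) ++ fmrGaps (seg.drop (m + 1)) (n + 1) hi
termination_by seg _ _ => seg.length
decreasing_by
  all_goals (simp; try omega)

def findMissingRanges_alt (nums : List Int) (lower : Int) (upper : Int) : List (List Int) :=
  fmrGaps nums lower upper

-- ===== PRECONDITION & SPEC =====
def Spec_findMissingRanges (nums : List Int) (lower : Int) (upper : Int) (out : List (List Int)) : Prop := out = findMissingRanges_alt nums lower upper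
instance (nums : List Int) (lower : Int) (upper : Int) (out : List (List Int)) : Decidable (Spec_findMissingRanges nums lower upper out) := by unfold Spec_findMissingRanges; infer_instance

-- ===== CLAIM (what is proved, stated in full; the proofs are below) =====
def Claim_equal_findMissingRanges : Prop := ∀ (nums : List Int) (lower : Int) (upper : Int), Dom_findMissingRanges nums lower upper → Spec_findMissingRanges nums lower upper (findMissingRanges nums lower upper)

-- ===== LEMMAS AND PROOFS =====

-- linear reference function bridging the two ports
def fmrLin : List Int → Int → Int → List (List Int)
  | [], lo, hi => if hi ≥ lo then [[lo, hi]] else []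
  | n :: t, lo, hi => (if n - 1 ≥ lo then [[lo, n - 1]] else []) ++ fmrLin t (n + 1) hi

theorem fmrLin_append (l : List Int) (n : Int) (r : List Int) (lo hi : Int) :
    fmrLin (l ++ n :: r) lo hi = fmrLin l lo (n - 1) ++ fmrLin r (n + 1) hi := by
  induction l generalizing lo with
  | nil => simp [fmrLin]
  | cons a t ih => simp [fmrLin, ih]

theorem fmrGaps_eq_lin (seg : List Int) (lo hi : Int) :
    fmrGaps seg lo hi = fmrLin seg lo hi := by
  fun_induction fmrGaps seg lo hi with
  | case1 lo hi h => simp [fmrLin, h]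
  | case2 lo hi h => simp [fmrLin]; omega
  | case3 a t lo hi seg m n ih1 ih2 =>
    have hm : m < seg.length := by simp [m, seg]; omega
    rw [ih1, ih2]
    have hseg : seg = seg.take m ++ seg[m] :: seg.drop (m + 1) := by
      conv_lhs => rw [← List.take_append_drop m seg]
      rw [List.getElem_cons_drop hm]
    have hn : n = seg[m] := List.getD_eq_getElem seg 0 hm
    show _ = fmrLin seg lo hi
    conv_rhs => rw [hseg]
    rw [fmrLin_append, hn]

-- A's loop from state (l, res) followed by the tail check equals res ++ fmrLin
theorem fmr_A (nums : List Int) (l upper : Int) (res : List (List Int)) :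
    (let st := nums.foldl (fun (st : Int × List (List Int)) n =>
        let l := st.1
        let r := n - 1
        let res := if r ≥ l then st.2 ++ [[l, r]] else st.2
        (n + 1, res)) (l, res)
     if upper ≥ st.1 then st.2 ++ [[st.1, upper]] else st.2)
    = res ++ fmrLin nums l upper := by
  induction nums generalizing l res with
  | nil => simp [fmrLin]; split_ifs <;> simp
  | cons n ns ih =>
    simp only [List.foldl_cons, fmrLin]
    rw [ih]
    split_ifs <;> simp

-- ===== VERDICT (by name: the statement is the Claim_ definition above) =====
theorem findMissingRanges_spec : Claim_equal_findMissingRanges := by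
  intro nums lower upper _
  show findMissingRanges nums lower upper = findMissingRanges_alt nums lower upper
  unfold findMissingRanges findMissingRanges_alt
  rw [fmrGaps_eq_lin]
  simpa using fmr_A nums lower upper []
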